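-- pv_equiv track=rewrite | github.com/iofu728/ProgrammingCode | leetcode/100666.py | lexicographicallySmallestString
-- ===== SOURCE A (Python) =====
-- def lexicographicallySmallestString(s: str) -> str:
--     n = len(s)
--     remEmpty = [[False] * n for _ in range(n)]
--     def consecutive(a, b):
--         d = abs(ord(a) - ord(b))
--         return d == 1 or d == 25
--     for i in range(n - 1):
--         if consecutive(s[i], s[i + 1]):
--             remEmpty[i][i + 1] = True
--     for L in range(4, n + 1, 2):
--         for i in range(n - L + 1):
--             j = i + L - 1
--             for k in range(i + 1, j + 1, 2):
--                 if consecutive(s[i], s[k]) and (k == i + 1 or remEmpty[i + 1][k - 1]) and (k == j or remEmpty[k + 1][j]):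
--                     remEmpty[i][j] = True
--                     break
--     f = [""] * (n + 1)
--     for i in range(n - 1, -1, -1):
--         best = s[i] + f[i + 1]
--         for j in range(i + 1, n, 2):
--             if remEmpty[i][j] and f[j + 1] < best:
--                 best = f[j + 1]
--         f[i] = best
--     return f[0]
-- ===== SOURCE B (Python) =====
-- def lexicographicallySmallestString(s: str) -> str:
--     n = len(s)
--
--     def consecutive(a, b):
--         d = abs(ord(a) - ord(b))
--         return d == 1 or d == 25
--
--     memo = {}
--
--     def canRemove(i, j):
--         # whether s[i..j] can be fully removed by repeated pair deletions
--         if (j - i + 1) % 2: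
--             return False
--         if (i, j) not in memo:
--             if j == i + 1:
--                 memo[(i, j)] = consecutive(s[i], s[j])
--             else:
--                 memo[(i, j)] = any(
--                     consecutive(s[i], s[k])
--                     and (k == i + 1 or canRemove(i + 1, k - 1))
--                     and (k == j or canRemove(k + 1, j))
--                     for k in range(i + 1, j + 1, 2)
--                 )
--         return memo[(i, j)]
--
--     f = [""] * (n + 1)
--     for i in range(n - 1, -1, -1):
--         f[i] = min([s[i] + f[i + 1]]
--                    + [f[j + 1] for j in range(i + 1, n, 2) if canRemove(i, j)])
--     return f[0]
-- ===== Notes on version B (the rewrite author's own statement) =====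
-- stated objective: alternative
-- what changed: Replaces A's bottom-up by-length triple-loop interval table with a memoized top-down recursion canRemove(i,j) that only fills queried states, and replaces A's explicit compare-and-update loop for f[i] with min() over a candidate list built by a comprehension.
import Mathlib
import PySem

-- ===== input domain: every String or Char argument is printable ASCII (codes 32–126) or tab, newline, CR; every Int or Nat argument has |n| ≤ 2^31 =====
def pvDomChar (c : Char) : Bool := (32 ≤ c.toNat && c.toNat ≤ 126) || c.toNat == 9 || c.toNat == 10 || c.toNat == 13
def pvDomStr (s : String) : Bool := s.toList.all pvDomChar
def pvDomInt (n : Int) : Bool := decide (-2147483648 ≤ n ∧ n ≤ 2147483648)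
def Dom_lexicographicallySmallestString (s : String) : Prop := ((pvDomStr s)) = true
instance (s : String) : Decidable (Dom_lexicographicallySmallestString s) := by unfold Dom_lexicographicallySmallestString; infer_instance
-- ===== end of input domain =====

-- B replaces A's bottom-up triple-loop interval table by a memoized top-down recursion
-- plus a min() over a candidate list (alternative decomposition, same exact results).

-- shared helpers (both Pythons contain the identical `consecutive`, index reads and `<` on strings)
-- s[i] for an index the loops keep in range (exact there)
def pvC (cs : List Char) (i : Nat) : Char := cs.getD i ' '
-- abs(ord a - ord b) == 1 or == 25
def pvConsec (a b : Char) : Bool :=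
  ((a.toNat : Int) - (b.toNat : Int)).natAbs == 1 || ((a.toNat : Int) - (b.toNat : Int)).natAbs == 25
-- Python `<` on strings = codepoint-lexicographic
def lexLt : List Char → List Char → Bool
  | [], [] => false
  | [], _ :: _ => true
  | _ :: _, [] => false
  | a :: as, b :: bs => if a < b then true else if b < a then false else lexLt as bs
-- range(a, b, 2) (exact: all such ranges in both Pythons have nonnegative bounds)
def range2 (a b : Nat) : List Nat := (List.range ((b - a + 1) / 2)).map (fun t => a + 2 * t)

-- ===== PORT A =====
-- remEmpty[i][j]  (all reads/writes the loops make are in range, where getD/set are exact)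
def tblGet (rem : List (List Bool)) (i j : Nat) : Bool := (rem.getD i []).getD j false
-- remEmpty[i][j] = True
def tblSet (rem : List (List Bool)) (i j : Nat) : List (List Bool) :=
  rem.set i ((rem.getD i []).set j true)

-- the inner k-loop: sets remEmpty[i][j] and breaks at the first matching k
def pvFindK (cs : List Char) (rem : List (List Bool)) (i j : Nat) : List Nat → Bool
  | [] => false
  | k :: ks =>
    if pvConsec (pvC cs i) (pvC cs k) && (k == i + 1 || tblGet rem (i + 1) (k - 1)) && (k == j || tblGet rem (k + 1) j)
    then true else pvFindK cs rem i j ks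

-- remEmpty = [[False]*n ...]; for i in range(n-1): if consecutive(s[i], s[i+1]): remEmpty[i][i+1] = True
def pvStage1 (cs : List Char) (n : Nat) : List (List Bool) :=
  (List.range (n - 1)).foldl
    (fun rem i => if pvConsec (pvC cs i) (pvC cs (i + 1)) then tblSet rem i (i + 1) else rem)
    (List.replicate n (List.replicate n false))

-- one iteration of the L-loop: for i in range(n - L + 1): ...
def pvLenPass (cs : List Char) (n : Nat) (rem : List (List Bool)) (L : Nat) : List (List Bool) :=
  (List.range (n - L + 1)).foldl
    (fun rem i =>
      if pvFindK cs rem i (i + L - 1) (range2 (i + 1) (i + L - 1 + 1)) then tblSet rem i (i + L - 1) else rem)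
    rem

-- for L in range(4, n+1, 2): ...
def pvStage2 (cs : List Char) (n : Nat) (rem : List (List Bool)) : List (List Bool) :=
  (range2 4 (n + 1)).foldl (pvLenPass cs n) rem

-- f = [""] * (n+1); for i in range(n-1,-1,-1): best = s[i]+f[i+1]; for j ...; f[i] = best
def pvFLoop (cs : List Char) (n : Nat) (rem : List (List Bool)) : List (List Char) :=
  ((List.range n).reverse).foldl
    (fun f i =>
      let best :=
        (range2 (i + 1) n).foldl
          (fun b j => if tblGet rem i j && lexLt (f.getD (j + 1) []) b then f.getD (j + 1) [] else b)
          (pvC cs i :: f.getD (i + 1) [])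
      f.set i best)
    (List.replicate (n + 1) [])

def lexicographicallySmallestString (s : String) : String :=
  let cs := s.toList
  let n := cs.length
  String.ofList ((pvFLoop cs n (pvStage2 cs n (pvStage1 cs n))).getD 0 [])

-- ===== PORT B =====
-- canRemove(i, j); the memo dict is a pure cache and is dropped; the recursion is made
-- total by a fuel argument (recursion depth ≤ j - i; callers pass j - i)
def altCanRem (cs : List Char) : Nat → Nat → Nat → Bool
  | 0, _, _ => false
  | fuel + 1, i, j =>
    if (j + 1 - i) % 2 == 1 then false
    else if j == i + 1 then pvConsec (pvC cs i) (pvC cs j)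
    else (range2 (i + 1) (j + 1)).any fun k =>
      pvConsec (pvC cs i) (pvC cs k) &&
        (k == i + 1 || altCanRem cs fuel (i + 1) (k - 1)) &&
        (k == j || altCanRem cs fuel (k + 1) j)

-- min(cands): first minimal element under Python `<`
def pyMinList (x : List Char) (l : List (List Char)) : List Char :=
  l.foldl (fun b c => if lexLt c b then c else b) x

-- f = [""] * (n+1); for i in range(n-1,-1,-1): f[i] = min([s[i]+f[i+1]] + [f[j+1] for j ... if canRemove(i,j)])
def altFLoop (cs : List Char) (n : Nat) : List (List Char) :=
  ((List.range n).reverse).foldl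
    (fun f i =>
      let cands := (range2 (i + 1) n).filterMap
        (fun j => if altCanRem cs (j - i) i j then some (f.getD (j + 1) []) else none)
      f.set i (pyMinList (pvC cs i :: f.getD (i + 1) []) cands))
    (List.replicate (n + 1) [])

def lexicographicallySmallestString_alt (s : String) : String :=
  let cs := s.toList
  let n := cs.length
  String.ofList ((altFLoop cs n).getD 0 [])

-- ===== PRECONDITION & SPEC =====
def Spec_lexicographicallySmallestString (s : String) (out : String) : Prop := out = lexicographicallySmallestString_alt s
instance (s : String) (out : String) : Decidable (Spec_lexicographicallySmallestString s out) := by unfold Spec_lexicographicallySmallestString; infer_instance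

-- ===== CLAIM (what is proved, stated in full; the proofs are below) =====
def Claim_equal_lexicographicallySmallestString : Prop := ∀ (s : String), Dom_lexicographicallySmallestString s → Spec_lexicographicallySmallestString s (lexicographicallySmallestString s)

-- ===== LEMMAS AND PROOFS =====

-- the fuel-free value of canRemove(i, j)
def CR (cs : List Char) (i j : Nat) : Bool := altCanRem cs (j - i) i j

theorem range2_mem {a b k : Nat} : k ∈ range2 a b ↔ ∃ t, k = a + 2 * t ∧ k < b := by
  simp only [range2, List.mem_map, List.mem_range]
  constructor
  · rintro ⟨t, ht, rfl⟩; exact ⟨t, rfl, by omega⟩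
  · rintro ⟨t, rfl, h⟩; exact ⟨t, by omega, rfl⟩

theorem anyCongr {α : Type} {l : List α} {p q : α → Bool} (h : ∀ x ∈ l, p x = q x) :
    l.any p = l.any q := by
  induction l with
  | nil => rfl
  | cons a l ih => simp only [List.any_cons, h a (by simp), ih (fun x hx => h x (by simp [hx]))]

theorem foldlCongr {α β : Type} {l : List α} {f g : β → α → β} {x : β}
    (h : ∀ b a, a ∈ l → f b a = g b a) : l.foldl f x = l.foldl g x := by
  induction l generalizing x with
  | nil => rfl
  | cons a l ih =>
    simp only [List.foldl_cons, h x a (by simp)]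
    exact ih (fun b a ha => h b a (by simp [ha]))

theorem getD_set {α : Type} (l : List α) (i j : Nat) (x d : α) :
    (l.set i x).getD j d = if i = j ∧ j < l.length then x else l.getD j d := by
  induction l generalizing i j with
  | nil => simp
  | cons a l ih =>
    cases i with
    | zero =>
      cases j with
      | zero => simp
      | succ j => simp
    | succ i =>
      cases j with
      | zero => simp
      | succ j =>
        simp only [List.set_cons_succ, List.getD_cons_succ, ih, List.length_cons]
        by_cases h : i = j ∧ j < l.length
        · rw [if_pos h, if_pos ⟨by omega, by omega⟩]
        · rw [if_neg h, if_neg (fun hc => h ⟨by omega, by omega⟩)]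

theorem getD_replicate {α : Type} (n a : Nat) (x d : α) :
    (List.replicate n x).getD a d = if a < n then x else d := by
  induction n generalizing a with
  | zero => simp
  | succ n ih =>
    cases a with
    | zero => simp
    | succ a =>
      simp only [List.replicate_succ, List.getD_cons_succ, ih]
      by_cases h : a < n
      · rw [if_pos h, if_pos (by omega)]
      · rw [if_neg h, if_neg (by omega)]

-- well-formedness of the table: n rows of length n
def TWf (n : Nat) (rem : List (List Bool)) : Prop :=
  rem.length = n ∧ ∀ a, a < n → (rem.getD a []).length = n

theorem TWf_init (n : Nat) : TWf n (List.replicate n (List.replicate n false)) := by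
  refine ⟨by simp, fun a ha => ?_⟩
  rw [getD_replicate, if_pos ha]
  simp

theorem TWf_set {n : Nat} {rem : List (List Bool)} (h : TWf n rem) (i j : Nat) :
    TWf n (tblSet rem i j) := by
  obtain ⟨h1, h2⟩ := h
  refine ⟨by simpa [tblSet] using h1, fun a ha => ?_⟩
  unfold tblSet
  rw [getD_set]
  by_cases hia : i = a ∧ a < rem.length
  · rw [if_pos hia, List.length_set, hia.1]
    exact h2 a ha
  · rw [if_neg hia]
    exact h2 a ha

theorem tblGet_set {n : Nat} {rem : List (List Bool)} (h : TWf n rem)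
    {i j : Nat} (hi : i < n) (hj : j < n) (a b : Nat) :
    tblGet (tblSet rem i j) a b = if a = i ∧ b = j then true else tblGet rem a b := by
  obtain ⟨h1, h2⟩ := h
  unfold tblGet tblSet
  rw [getD_set]
  by_cases hia : i = a ∧ a < rem.length
  · rw [if_pos hia]
    obtain ⟨rfl, _⟩ := hia
    rw [getD_set]
    by_cases hjb : j = b ∧ b < (rem.getD i []).length
    · rw [if_pos hjb, if_pos ⟨rfl, hjb.1.symm⟩]
    · rw [if_neg hjb, if_neg ?_]
      rintro ⟨-, rfl⟩
      exact hjb ⟨rfl, by rw [h2 i hi]; exact hj⟩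
  · rw [if_neg hia, if_neg ?_]
    rintro ⟨rfl, rfl⟩
    exact hia ⟨rfl, by omega⟩

theorem tblGet_init (n a b : Nat) :
    tblGet (List.replicate n (List.replicate n false)) a b = false := by
  unfold tblGet
  rw [getD_replicate]
  by_cases h : a < n
  · rw [if_pos h, getD_replicate]
    by_cases h' : b < n
    · rw [if_pos h']
    · rw [if_neg h']
  · rw [if_neg h]
    rfl

theorem altCanRem_fuel (cs : List Char) :
    ∀ (f i j : Nat), j - i ≤ f → altCanRem cs f i j = altCanRem cs (j - i) i j := by
  intro f
  induction f using Nat.strong_induction_on with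
  | _ f IH =>
    intro i j h
    match f with
    | 0 => rw [show j - i = 0 by omega]
    | Nat.succ f =>
      rcases Nat.eq_zero_or_pos (j - i) with e | e
      · rw [e]
        have hr : altCanRem cs 0 i j = false := rfl
        rw [hr]
        simp only [altCanRem]
        by_cases hji : j = i
        · subst hji; simp
        · have h2 : (j + 1 - i) % 2 = 0 := by omega
          have h3 : ¬ (j = i + 1) := by omega
          simp [h2, h3, range2, e]
      · obtain ⟨e, he⟩ : ∃ e, j - i = e + 1 := ⟨j - i - 1, by omega⟩
        rw [he]
        simp only [altCanRem]
        split_ifs with h1 h2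
        · rfl
        · rfl
        · refine anyCongr ?_
          intro k hk
          obtain ⟨t, hkt, hkb⟩ := range2_mem.mp hk
          have hkle : k ≤ j := by omega
          rw [IH f (by omega) (i + 1) (k - 1) (by omega),
              IH e (by omega) (i + 1) (k - 1) (by omega),
              IH f (by omega) (k + 1) j (by omega),
              IH e (by omega) (k + 1) j (by omega)]

theorem CR_odd (cs : List Char) {i j : Nat} (h2 : (j - i) % 2 = 0) : CR cs i j = false := by
  rcases Nat.eq_zero_or_pos (j - i) with e | e
  · unfold CR; rw [e]; rfl
  · obtain ⟨e, he⟩ : ∃ e, j - i = e + 1 := ⟨j - i - 1, by omega⟩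
    unfold CR
    rw [he]
    simp [altCanRem, show (j + 1 - i) % 2 = 1 by omega]

theorem CR_two (cs : List Char) (a : Nat) : CR cs a (a + 1) = pvConsec (pvC cs a) (pvC cs (a + 1)) := by
  unfold CR
  rw [show a + 1 - a = 1 by omega]
  simp [altCanRem, show (a + 1 + 1 - a) % 2 = 0 by omega]

theorem stage1_aux (cs : List Char) (n : Nat) (m : Nat) (hm : m ≤ n - 1) :
    TWf n ((List.range m).foldl
      (fun rem i => if pvConsec (pvC cs i) (pvC cs (i + 1)) then tblSet rem i (i + 1) else rem)
      (List.replicate n (List.replicate n false)))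
    ∧ ∀ a b : Nat,
      tblGet ((List.range m).foldl
        (fun rem i => if pvConsec (pvC cs i) (pvC cs (i + 1)) then tblSet rem i (i + 1) else rem)
        (List.replicate n (List.replicate n false))) a b
      = (decide (a < m) && decide (b = a + 1) && pvConsec (pvC cs a) (pvC cs (a + 1))) := by
  induction m with
  | zero => exact ⟨TWf_init n, fun a b => by simp [tblGet_init]⟩
  | succ m ih =>
    obtain ⟨ihw, ihv⟩ := ih (by omega)
    rw [List.range_succ, List.foldl_append, List.foldl_cons, List.foldl_nil]
    constructor
    · by_cases hc : pvConsec (pvC cs m) (pvC cs (m + 1)) = true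
      · rw [if_pos hc]; exact TWf_set ihw m (m + 1)
      · rw [if_neg hc]; exact ihw
    · intro a b
      by_cases hc : pvConsec (pvC cs m) (pvC cs (m + 1)) = true
      · rw [if_pos hc, tblGet_set ihw (by omega) (by omega) a b]
        by_cases hab : a = m ∧ b = m + 1
        · rw [if_pos hab]
          obtain ⟨rfl, rfl⟩ := hab
          simp [hc]
        · rw [if_neg hab, ihv a b]
          by_cases ham : a < m
          · simp [ham, show a < m + 1 by omega]
          · by_cases ham1 : a < m + 1
            · have ha : a = m := by omega
              subst ha
              have hb : ¬ b = a + 1 := fun hb => hab ⟨rfl, hb⟩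
              simp [hb]
            · simp [ham, ham1]
      · rw [if_neg hc, ihv a b]
        by_cases ham : a = m
        · subst ham
          simp only [show ¬ (a < a) from by omega, decide_false, Bool.false_and]
          by_cases hb : b = a + 1
          · subst hb
            simp [hc, show a < a + 1 by omega]
          · simp [hb]
        · by_cases ham1 : a < m
          · simp [ham1, show a < m + 1 by omega]
          · simp [show ¬ a < m from by omega, show ¬ a < m + 1 from by omega]

-- the table invariant after all lengths ≤ L have been processed
def InvT (cs : List Char) (n L : Nat) (rem : List (List Bool)) : Prop :=
  TWf n rem ∧
  ∀ a b : Nat, a < b → b < n →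
    (b - a + 1 ≤ L → tblGet rem a b = CR cs a b) ∧ (L < b - a + 1 → tblGet rem a b = false)

-- the invariant inside the pass for length L, after the first m starting positions
def InvP (cs : List Char) (n L m : Nat) (rem : List (List Bool)) : Prop :=
  TWf n rem ∧
  ∀ a b : Nat, a < b → b < n →
    (b - a + 1 < L → tblGet rem a b = CR cs a b) ∧ (L < b - a + 1 → tblGet rem a b = false) ∧
    (b - a + 1 = L → ((a < m → tblGet rem a b = CR cs a b) ∧ (m ≤ a → tblGet rem a b = false)))

theorem pvFindK_eq_any (cs : List Char) (rem : List (List Bool)) (i j : Nat) (l : List Nat) :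
    pvFindK cs rem i j l
    = l.any (fun k => pvConsec (pvC cs i) (pvC cs k) && (k == i + 1 || tblGet rem (i + 1) (k - 1)) && (k == j || tblGet rem (k + 1) j)) := by
  induction l with
  | nil => rfl
  | cons k l ih =>
    simp only [pvFindK, List.any_cons, ← ih]
    split_ifs with h
    · simp [h]
    · simp [h]

theorem findK_eq_CR (cs : List Char) (n L m : Nat) (rem : List (List Bool))
    (hL4 : 4 ≤ L) (hLe : L % 2 = 0) (hjn : m + L - 1 < n) (hInv : InvP cs n L m rem) :
    pvFindK cs rem m (m + L - 1) (range2 (m + 1) (m + L - 1 + 1)) = CR cs m (m + L - 1) := by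
  obtain ⟨_, hInv⟩ := hInv
  rw [pvFindK_eq_any]
  obtain ⟨e, hLe2⟩ : ∃ e, L - 2 = e := ⟨L - 2, rfl⟩
  have hspan : m + L - 1 - m = e + 1 := by omega
  unfold CR
  rw [hspan]
  simp only [altCanRem]
  rw [if_neg (by simp; omega), if_neg (by simp; omega)]
  refine anyCongr ?_
  intro k hk
  obtain ⟨t, hkt, hkb⟩ := range2_mem.mp hk
  have h1 : altCanRem cs e (m + 1) (k - 1) = CR cs (m + 1) (k - 1) := by
    unfold CR; exact altCanRem_fuel cs e _ _ (by omega)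
  have h2 : altCanRem cs e (k + 1) (m + L - 1) = CR cs (k + 1) (m + L - 1) := by
    unfold CR; exact altCanRem_fuel cs e _ _ (by omega)
  rw [h1, h2]
  have hmid : ((k == m + 1) || tblGet rem (m + 1) (k - 1)) = ((k == m + 1) || CR cs (m + 1) (k - 1)) := by
    by_cases hk1 : k = m + 1
    · simp [hk1]
    · have hg := (hInv (m + 1) (k - 1) (by omega) (by omega)).1 (by omega)
      simp only [hg]
  have hthird : ((k == m + L - 1) || tblGet rem (k + 1) (m + L - 1))
      = ((k == m + L - 1) || CR cs (k + 1) (m + L - 1)) := by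
    by_cases hk2 : k = m + L - 1
    · simp [hk2]
    · have hg := (hInv (k + 1) (m + L - 1) (by omega) (by omega)).1 (by omega)
      simp only [hg]
  rw [hmid, hthird]

theorem pass_inv (cs : List Char) (n L : Nat) (rem : List (List Bool))
    (hL4 : 4 ≤ L) (hLe : L % 2 = 0) (hLn : L ≤ n) (hInv : InvT cs n (L - 2) rem) :
    InvT cs n L (pvLenPass cs n rem L) := by
  unfold pvLenPass
  obtain ⟨hWf0, hInv⟩ := hInv
  have base : InvP cs n L 0 rem := by
    refine ⟨hWf0, fun a b hab hbn => ?_⟩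
    obtain ⟨c1, c2⟩ := hInv a b hab hbn
    refine ⟨?_, fun h => c2 (by omega), fun h => ⟨fun h0 => by omega, fun _ => c2 (by omega)⟩⟩
    intro h
    by_cases h' : b - a + 1 ≤ L - 2
    · exact c1 h'
    · rw [c2 (by omega), CR_odd cs (by omega)]
  have main : ∀ M, M ≤ n - L + 1 →
      InvP cs n L M ((List.range M).foldl
        (fun rem i => if pvFindK cs rem i (i + L - 1) (range2 (i + 1) (i + L - 1 + 1)) then tblSet rem i (i + L - 1) else rem) rem) := by
    intro M
    induction M with
    | zero => intro _; simpa using base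
    | succ M ih =>
      intro hM
      rw [List.range_succ, List.foldl_append, List.foldl_cons, List.foldl_nil]
      have hprev := ih (by omega)
      set G := (List.range M).foldl
        (fun rem i => if pvFindK cs rem i (i + L - 1) (range2 (i + 1) (i + L - 1 + 1)) then tblSet rem i (i + L - 1) else rem) rem with hG
      have hMn : M + L - 1 < n := by omega
      have hfk := findK_eq_CR cs n L M G hL4 hLe hMn hprev
      obtain ⟨hWf, hval⟩ := hprev
      constructor
      · by_cases hf : pvFindK cs G M (M + L - 1) (range2 (M + 1) (M + L - 1 + 1)) = true
        · rw [if_pos hf]; exact TWf_set hWf M (M + L - 1)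
        · rw [if_neg hf]; exact hWf
      intro a b hab hbn
      obtain ⟨c1, c2, c3⟩ := hval a b hab hbn
      by_cases hmb : a = M ∧ b = M + L - 1
      · obtain ⟨rfl, rfl⟩ := hmb
        have hcell : tblGet (if pvFindK cs G a (a + L - 1) (range2 (a + 1) (a + L - 1 + 1)) then tblSet G a (a + L - 1) else G) a (a + L - 1)
            = CR cs a (a + L - 1) := by
          by_cases hf : pvFindK cs G a (a + L - 1) (range2 (a + 1) (a + L - 1 + 1)) = true
          · rw [if_pos hf, tblGet_set hWf (by omega) (by omega), if_pos ⟨rfl, rfl⟩, ← hfk, hf]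
          · rw [if_neg hf, c3 (by omega) |>.2 (by omega), ← hfk,
                Bool.not_eq_true _ |>.mp hf]
        exact ⟨fun h => by omega, fun h => by omega, fun _ => ⟨fun _ => hcell, fun h => by omega⟩⟩
      · have hkeep : tblGet (if pvFindK cs G M (M + L - 1) (range2 (M + 1) (M + L - 1 + 1)) then tblSet G M (M + L - 1) else G) a b
            = tblGet G a b := by
          by_cases hf : pvFindK cs G M (M + L - 1) (range2 (M + 1) (M + L - 1 + 1)) = true
          · rw [if_pos hf, tblGet_set hWf (by omega) (by omega), if_neg hmb]
          · rw [if_neg hf]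
        rw [hkeep]
        refine ⟨c1, c2, fun hs => ⟨fun hA => ?_, fun hA => (c3 hs).2 (by omega)⟩⟩
        refine (c3 hs).1 ?_
        rcases Nat.lt_or_ge a M with h' | h'
        · exact h'
        · exact ((hmb (show a = M ∧ b = M + L - 1 by constructor <;> omega)).elim)
  obtain ⟨hWf, hval⟩ := main (n - L + 1) (le_refl _)
  refine ⟨hWf, fun a b hab hbn => ?_⟩
  obtain ⟨c1, c2, c3⟩ := hval a b hab hbn
  constructor
  · intro h
    rcases Nat.lt_or_ge (b - a + 1) L with h' | h'
    · exact c1 h'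
    · exact (c3 (by omega)).1 (by omega)
  · exact c2

theorem stage2_inv (cs : List Char) (n : Nat) (rem : List (List Bool)) :
    ∀ q : Nat, (∀ t, t < q → 4 + 2 * t ≤ n) → InvT cs n 2 rem →
      InvT cs n (2 + 2 * q)
        ((List.range q).foldl (fun rem t => pvLenPass cs n rem (4 + 2 * t)) rem) := by
  intro q
  induction q with
  | zero => intro _ hbase; simpa using hbase
  | succ q ih =>
    intro hall hbase
    rw [List.range_succ, List.foldl_append, List.foldl_cons, List.foldl_nil]
    have hq := ih (fun t ht => hall t (by omega)) hbase
    have hp := pass_inv cs n (4 + 2 * q) _ (by omega) (by omega) (hall q (by omega))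
      (by rw [show 4 + 2 * q - 2 = 2 + 2 * q by omega]; exact hq)
    rw [show 2 + 2 * (q + 1) = 4 + 2 * q by omega]
    exact hp

theorem table_eq (cs : List Char) (n : Nat) :
    ∀ a b : Nat, a < b → b < n → tblGet (pvStage2 cs n (pvStage1 cs n)) a b = CR cs a b := by
  intro a b hab hbn
  have hInv2 : InvT cs n 2 (pvStage1 cs n) := by
    obtain ⟨hw, hv⟩ := stage1_aux cs n (n - 1) (le_refl _)
    refine ⟨hw, fun a' b' hab' hbn' => ?_⟩
    rw [show pvStage1 cs n = (List.range (n - 1)).foldl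
      (fun rem i => if pvConsec (pvC cs i) (pvC cs (i + 1)) then tblSet rem i (i + 1) else rem)
      (List.replicate n (List.replicate n false)) from rfl, hv a' b']
    constructor
    · intro h
      have hb' : b' = a' + 1 := by omega
      subst hb'
      rw [CR_two]
      simp [show a' < n - 1 by omega]
    · intro h
      simp [show ¬ b' = a' + 1 by omega]
  unfold pvStage2
  rw [show range2 4 (n + 1) = (List.range ((n + 1 - 4 + 1) / 2)).map (fun t => 4 + 2 * t) from rfl,
      List.foldl_map]
  have hfin := stage2_inv cs n (pvStage1 cs n) ((n + 1 - 4 + 1) / 2) (fun t ht => by omega) hInv2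
  by_cases h : b - a + 1 ≤ 2 + 2 * ((n + 1 - 4 + 1) / 2)
  · exact (hfin.2 a b hab hbn).1 h
  · rw [(hfin.2 a b hab hbn).2 (by omega), CR_odd cs (by omega)]

theorem minList_filterMap (l : List Nat) (p : Nat → Bool) (v : Nat → List Char) :
    ∀ x : List Char,
      pyMinList x (l.filterMap fun j => if p j then some (v j) else none)
      = l.foldl (fun b j => if p j && lexLt (v j) b then v j else b) x := by
  induction l with
  | nil => intro x; rfl
  | cons j l ih =>
    intro x
    by_cases hp : p j = true
    · simp only [List.filterMap_cons, hp, List.foldl_cons, Bool.true_and, if_true]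
      exact ih _
    · simp only [List.filterMap_cons, List.foldl_cons, hp, Bool.false_and]
      exact ih x

theorem ports_eq (s : String) : lexicographicallySmallestString s = lexicographicallySmallestString_alt s := by
  unfold lexicographicallySmallestString lexicographicallySmallestString_alt
  show String.ofList ((pvFLoop s.toList s.toList.length (pvStage2 s.toList s.toList.length (pvStage1 s.toList s.toList.length))).getD 0 [])
      = String.ofList ((altFLoop s.toList s.toList.length).getD 0 [])
  unfold pvFLoop altFLoop
  refine congrArg (fun l => String.ofList (List.getD l 0 [])) (foldlCongr ?_)
  intro f i _
  show f.set i _ = f.set i _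
  congr 1
  rw [minList_filterMap (range2 (i + 1) s.toList.length)
    (fun j => altCanRem s.toList (j - i) i j) (fun j => f.getD (j + 1) [])]
  refine foldlCongr ?_
  intro b j hj
  obtain ⟨t, hjt, hjb⟩ := range2_mem.mp hj
  rw [table_eq s.toList s.toList.length i j (by omega) hjb]
  rfl

-- ===== VERDICT (by name: the statement is the Claim_ definition above) =====
theorem lexicographicallySmallestString_spec : Claim_equal_lexicographicallySmallestString := by
  intro s _
  exact ports_eq s
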